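-- pv_equiv track=rewrite | github.com/rajansh87/Algorithms-Implementations | Number of n length and value less than k.py | solve
-- ===== SOURCE A (Python) =====
-- def solve(A, B, C):
--     MAX=10
--     def numToVec(N):
--
--         digit = []
--
--         # Push all the digits of N from the end
--         # one by one to the vector
--         while (N != 0):
--             digit.append(N % 10)
--             N = N // 10
--
--         # If the original number was 0
--         if (len(digit) == 0):
--             digit.append(0)
--
--         # Reverse the vector elements
--         digit = digit[::-1]
--
--         # Return the required vector
--         return digit
--
--
--     # Function to return the count of B length integers
--     # which are less than C and they
--     # contain digits from set A[] only
--     def solve2(A, B, C):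
--         d, d2 = 0,0
--
--         # Convert number to digit array
--         digit = numToVec(C)
--         d = len(A)
--
--         # Case 1: No such number possible as the
--         # generated numbers will always
--         # be greater than C
--         if (B > len(digit) or d == 0):
--             return 0
--
--         # Case 2: All integers of length B are valid
--         # as they all are less than C
--         elif (B < len(digit)):
--             # contain 0
--             if (A[0] == 0 and B != 1):
--                 return (d - 1) * pow(d, B - 1)
--             else:
--                 return pow(d, B)
--
--         # Case 3
--         else :
--             dp=[0 for i in range(B + 1)]
--             lower=[0 for i in range(MAX + 1)]
--
--             # Update the lower[] array such that
--             # lower[i] stores the count of elements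
--             # in A[] which are less than i
--             for i in range(d):
--                 lower[A[i] + 1] = 1
--             for i in range(1, MAX+1):
--                 lower[i] = lower[i - 1] + lower[i]
--
--             flag = True
--             dp[0] = 0
--             for i in range(1, B+1):
--                 d2 = lower[digit[i - 1]]
--                 dp[i] = dp[i - 1] * d
--
--                 # For first index we can't use 0
--                 if (i == 1 and A[0] == 0 and B != 1):
--                     d2 = d2 - 1
--
--                 # Whether (i-1) digit of generated number
--                 # can be equal to (i - 1) digit of C
--                 if (flag):
--                     dp[i] += d2
--
--                 # Is digit[i - 1] present in A ?
--                 flag = (flag & (lower[digit[i - 1] + 1] == lower[digit[i - 1]] + 1))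
--
--             return dp[B]
--
--     return solve2(A,B,C)
-- ===== SOURCE B (Python) =====
-- def solve(A, B, C):
--     d = len(A)
--     S = set(A)
--     # number of decimal digits of C, by repeated division
--     L = 1
--     n = C
--     while n >= 10:
--         n //= 10
--         L += 1
--     if B > L or d == 0:
--         # Case 1: every generated number would exceed C
--         return 0
--     if B < L:
--         # Case 2: every B-length number qualifies
--         if A[0] == 0 and B != 1:
--             return (d - 1) * d ** (B - 1)
--         return d ** B
--     # Case 3: B == L.  Recurse on C itself with divmod, least-significant digit
--     # first: count(n, k) returns (cnt, ok) where cnt is the number of k-digit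
--     # strings over A (weighted by len(A)) strictly below the low k digits of n,
--     # and ok says whether those k digits of n all belong to A.
--     def count(n, k):
--         if k == 0:
--             return 0, True
--         q, r = divmod(n, 10)
--         cnt, ok = count(q, k - 1)
--         rank = sum(1 for a in S if a < r)
--         return cnt * d + (rank if ok else 0), ok and r in S
--     total, _ = count(C, B)
--     if A[0] == 0 and B != 1:
--         # forbid the leading zero: drop the d**(B-1) strings it headed
--         total -= d ** (B - 1)
--     return total
-- ===== Notes on version B (the rewrite author's own statement) =====
-- stated objective: alternative
-- what changed: Case 3 drops A's digit array, dp[] table and lower[] prefix-count table entirely: B recurses on C itself with divmod (least-significant digit first), each call returning a pair (count so far, prefix-valid flag), with per-digit rank taken from a set of A; the leading-zero quirk becomes a single d**(B-1) subtraction after the recursion instead of A's in-loop -1 at i==1.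
-- outside the precondition, e.g. on solve([-2], 1, 5): A returns 0, B returns 1; on solve([2], -1, 5): A returns 1.0, B returns 1.0; on solve([0, 2], 0, 7): A returns 0.5, B returns 0.5
import Mathlib
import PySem

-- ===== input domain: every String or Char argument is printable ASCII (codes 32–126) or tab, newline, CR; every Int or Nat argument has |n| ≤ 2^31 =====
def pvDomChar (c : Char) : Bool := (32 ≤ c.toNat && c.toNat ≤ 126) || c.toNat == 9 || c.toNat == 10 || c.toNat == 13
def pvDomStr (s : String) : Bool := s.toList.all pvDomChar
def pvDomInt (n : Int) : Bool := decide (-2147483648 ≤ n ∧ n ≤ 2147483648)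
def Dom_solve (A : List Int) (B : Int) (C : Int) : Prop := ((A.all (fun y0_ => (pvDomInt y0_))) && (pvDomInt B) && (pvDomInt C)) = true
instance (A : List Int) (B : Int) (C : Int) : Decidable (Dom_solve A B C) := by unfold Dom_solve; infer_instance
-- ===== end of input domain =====

-- B replaces A's Case-3 digit array + dp[]/lower[] tables by a divmod recursion on C
-- returning a (count, valid) pair (alternative decomposition, same cost).

-- ===== PORT A =====
-- while (N != 0): digit.append(N % 10); N = N // 10  — fueled structural recursion;
-- fuel N.natAbs + 1 suffices for every N ≥ 0 (for N < 0 the Python loop diverges; Pre_solve excludes C < 0).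
def numToVecLoop : Nat → Int → List Int → List Int
  | 0, _, acc => acc
  | f+1, N, acc =>
      if N ≠ 0 then numToVecLoop f (PySem.Int.floordiv N 10) (acc ++ [PySem.Int.mod N 10]) else acc

def numToVec (N : Int) : List Int :=
  let digit := numToVecLoop (N.natAbs + 1) N []
  let digit := if digit.length = 0 then digit ++ [0] else digit
  (PySem.List.slice? digit none none (-1)).getD []   -- digit[::-1]

def solve (A : List Int) (B : Int) (C : Int) : Int :=
  let digit := numToVec C
  let d : Int := A.length
  -- Case 1
  if B > (digit.length : Int) ∨ d = 0 then 0
  -- Case 2 (A[0] is only evaluated with A ≠ [] in Python, since d == 0 returned above; pyGetD is exact there)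
  else if B < (digit.length : Int) then
    if PySem.List.pyGetD A 0 0 = 0 ∧ B ≠ 1 then (d - 1) * d ^ (B - 1).toNat else d ^ B.toNat
  -- Case 3
  else
    let dp : List Int := (PySem.List.pyRange 0 (B + 1) 1).map (fun _ => 0)
    let lower : List Int := (PySem.List.pyRange 0 11 1).map (fun _ => 0)
    -- for i in range(d): lower[A[i] + 1] = 1   (in range under Pre_solve; pySetD is exact there)
    let lower := (PySem.List.pyRange 0 d 1).foldl
      (fun l i => PySem.List.pySetD l (PySem.List.pyGetD A i 0 + 1) 1) lower
    -- for i in range(1, MAX + 1): lower[i] = lower[i - 1] + lower[i]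
    let lower := (PySem.List.pyRange 1 11 1).foldl
      (fun l i => PySem.List.pySetD l i (PySem.List.pyGetD l (i - 1) 0 + PySem.List.pyGetD l i 0)) lower
    let res := (PySem.List.pyRange 1 (B + 1) 1).foldl
      (fun (s : List Int × Bool) i =>
        let dp := s.1
        let flag := s.2
        let d2 := PySem.List.pyGetD lower (PySem.List.pyGetD digit (i - 1) 0) 0
        let dp := PySem.List.pySetD dp i (PySem.List.pyGetD dp (i - 1) 0 * d)
        let d2 := if i = 1 ∧ PySem.List.pyGetD A 0 0 = 0 ∧ B ≠ 1 then d2 - 1 else d2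
        let dp := if flag then PySem.List.pySetD dp i (PySem.List.pyGetD dp i 0 + d2) else dp
        let flag := flag && (PySem.List.pyGetD lower (PySem.List.pyGetD digit (i - 1) 0 + 1) 0
                              == PySem.List.pyGetD lower (PySem.List.pyGetD digit (i - 1) 0) 0 + 1)
        (dp, flag))
      (PySem.List.pySetD dp 0 0, true)
    PySem.List.pyGetD res.1 B 0

-- ===== PORT B =====
-- while n >= 10: n //= 10; L += 1  — fueled structural recursion; fuel C.natAbs + 1 always suffices
def altLenLoop : Nat → Int → Int → Int
  | 0, _, L => L
  | f+1, n, L => if n ≥ 10 then altLenLoop f (PySem.Int.floordiv n 10) (L + 1) else L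

-- Source B's count(n, k): divmod recursion on n, least-significant digit first
def altCount (S : List Int) (d : Int) : Int → Nat → Int × Bool
  | _, 0 => (0, true)
  | n, k+1 =>
      let q := PySem.Int.floordiv n 10
      let r := PySem.Int.mod n 10
      let p := altCount S d q k
      let rank : Int := ((S.filter (fun a => a < r)).length : Int)   -- sum(1 for a in S if a < r)
      (p.1 * d + (if p.2 then rank else 0), p.2 && S.contains r)

def solve_alt (A : List Int) (B : Int) (C : Int) : Int :=
  let d : Int := A.length
  let S : PySem.Set Int := PySem.Set.ofList A
  let L := altLenLoop (C.natAbs + 1) C 1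
  if B > L ∨ d = 0 then 0
  else if B < L then
    if PySem.List.pyGetD A 0 0 = 0 ∧ B ≠ 1 then (d - 1) * d ^ (B - 1).toNat else d ^ B.toNat
  else
    let total := (altCount S d C B.toNat).1
    if PySem.List.pyGetD A 0 0 = 0 ∧ B ≠ 1 then total - d ^ (B - 1).toNat else total

-- ===== PRECONDITION & SPEC =====
-- Pre_solve restricts to the natural domain of the task: C ≥ 0 (A's digit loop diverges on C < 0); B ≥ 1
-- unless A = [] or (B = 0 with A[0] ≠ 0) (other B ≤ 0 make A's pow return a float, not an int); and when B
-- equals the decimal-digit count of C (the only case reading A's values as table indices) all elements of A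
-- must be decimal digits 0..9 — outside that, A raises IndexError or reads its table via negative-index wraparound.
def Pre_solve (A : List Int) (B : Int) (C : Int) : Prop :=
  0 ≤ C ∧ (1 ≤ B ∨ A = [] ∨ (B = 0 ∧ A.headD 0 ≠ 0)) ∧
  (((C = 0 ∧ B = 1) ∨ (1 ≤ B ∧ B ≤ 10 ∧ (10 : Int) ^ (B - 1).toNat ≤ C ∧ C < 10 ^ B.toNat)) →
    ∀ a ∈ A, 0 ≤ a ∧ a ≤ 9)
instance (A : List Int) (B : Int) (C : Int) : Decidable (Pre_solve A B C) := by
  unfold Pre_solve; infer_instance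

def pvWitness_solve : List Int × Int × Int := ([1, 2], 2, 34)

def Spec_solve (A : List Int) (B : Int) (C : Int) (out : Int) : Prop := out = solve_alt A B C
instance (A : List Int) (B : Int) (C : Int) (out : Int) : Decidable (Spec_solve A B C out) := by
  unfold Spec_solve; infer_instance

-- ===== CLAIM (what is proved, stated in full; the proofs are below) =====
def Claim_equal_solve : Prop :=
  ∀ (A : List Int) (B : Int) (C : Int), Dom_solve A B C → Pre_solve A B C → Spec_solve A B C (solve A B C)

-- ===== LEMMAS AND PROOFS =====

def lsbOf : Int → Nat → List Int
  | _, 0 => []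
  | n, k+1 => PySem.Int.mod n 10 :: lsbOf (PySem.Int.floordiv n 10) k

def digitsOf (n : Int) (k : Nat) : List Int := (lsbOf n k).reverse

theorem length_lsbOf (n : Int) (k : Nat) : (lsbOf n k).length = k := by
  induction k generalizing n with
  | zero => rfl
  | succ k ih => simp [lsbOf, ih]

theorem length_digitsOf (n : Int) (k : Nat) : (digitsOf n k).length = k := by
  simp [digitsOf, length_lsbOf]

theorem mem_lsbOf {c n : Int} {k : Nat} (h : c ∈ lsbOf n k) : 0 ≤ c ∧ c < 10 := by
  induction k generalizing n with
  | zero => simp [lsbOf] at h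
  | succ k ih =>
    simp only [lsbOf, List.mem_cons] at h
    rcases h with h | h
    · subst h
      exact ⟨PySem.Int.mod_nonneg _ (by norm_num), PySem.Int.mod_lt _ (by norm_num)⟩
    · exact ih h

theorem mem_digitsOf {c n : Int} {k : Nat} (h : c ∈ digitsOf n k) : 0 ≤ c ∧ c < 10 :=
  mem_lsbOf (by simpa [digitsOf] using h)

theorem numToVecLoop_zero (f : Nat) (acc : List Int) : numToVecLoop f 0 acc = acc := by
  cases f <;> simp [numToVecLoop]

theorem numToVecLoop_spec : ∀ (k fuel : Nat) (n : Int) (acc : List Int),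
    1 ≤ k → k ≤ fuel → (10:Int)^(k-1) ≤ n → n < 10^k →
    numToVecLoop fuel n acc = acc ++ lsbOf n k := by
  intro k
  induction k with
  | zero => omega
  | succ k ih =>
    intro fuel n acc _ hf h1 h2
    obtain ⟨f, rfl⟩ : ∃ f, fuel = f + 1 := ⟨fuel - 1, by omega⟩
    have h10 : (0:Int) < 10 := by norm_num
    have hn0 : (1:Int) ≤ n := le_trans (one_le_pow₀ (by norm_num)) h1
    rw [numToVecLoop, if_pos (by omega)]
    rcases Nat.eq_zero_or_pos k with rfl | hk
    · have : PySem.Int.floordiv n 10 = 0 := by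
        rw [PySem.Int.floordiv_eq_ediv_of_pos h10]
        omega
      rw [this, numToVecLoop_zero]
      simp [lsbOf]

    · have hq1 : (10:Int)^(k-1) ≤ PySem.Int.floordiv n 10 := by
        rw [PySem.Int.floordiv_eq_ediv_of_pos h10, Int.le_ediv_iff_mul_le h10]
        calc (10:Int)^(k-1) * 10 = 10^k := by
              rw [mul_comm, ← pow_succ']
              congr 1; omega
          _ ≤ n := by simpa using h1
      have hq2 : PySem.Int.floordiv n 10 < 10^k := by
        rw [PySem.Int.floordiv_eq_ediv_of_pos h10, Int.ediv_lt_iff_lt_mul h10]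
        calc n < 10^(k+1) := by simpa using h2
          _ = 10^k * 10 := by rw [pow_succ]
      rw [ih f _ _ hk (by omega) hq1 hq2]
      simp [lsbOf]

theorem altLenLoop_lt10 (f : Nat) (n L : Int) (h : n < 10) : altLenLoop f n L = L := by
  have h' : ¬ n ≥ 10 := by omega
  cases f <;> simp [altLenLoop, h']

theorem altLenLoop_spec : ∀ (k fuel : Nat) (n L : Int),
    1 ≤ k → k ≤ fuel + 1 → (10:Int)^(k-1) ≤ n → n < 10^k →
    altLenLoop fuel n L = L + (k - 1 : Nat) := by
  intro k
  induction k with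
  | zero => omega
  | succ k ih =>
    intro fuel n L _ hf h1 h2
    rcases Nat.eq_zero_or_pos k with rfl | hk
    · rw [altLenLoop_lt10 _ _ _ (by simpa using h2)]; simp
    · have h10 : (0:Int) < 10 := by norm_num
      have hge : (10:Int) ≤ n := by
        calc (10:Int) = 10^1 := by norm_num
          _ ≤ 10^((k+1)-1) := by
              apply pow_le_pow_right₀ (by norm_num); omega
          _ ≤ n := h1
      obtain ⟨f, rfl⟩ : ∃ f, fuel = f + 1 := ⟨fuel - 1, by omega⟩
      rw [altLenLoop, if_pos (by omega)]
      have hq1 : (10:Int)^(k-1) ≤ PySem.Int.floordiv n 10 := by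
        rw [PySem.Int.floordiv_eq_ediv_of_pos h10, Int.le_ediv_iff_mul_le h10]
        calc (10:Int)^(k-1) * 10 = 10^k := by
              rw [mul_comm, ← pow_succ']
              congr 1; omega
          _ ≤ n := by simpa using h1
      have hq2 : PySem.Int.floordiv n 10 < 10^k := by
        rw [PySem.Int.floordiv_eq_ediv_of_pos h10, Int.ediv_lt_iff_lt_mul h10]
        calc n < 10^(k+1) := by simpa using h2
          _ = 10^k * 10 := by rw [pow_succ]
      rw [ih f _ _ hk (by omega) hq1 hq2]
      push_cast
      omega

theorem k_le_pow (k : Nat) (h : 1 ≤ k) : (k:Int) ≤ 10^(k-1) := by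
  have h2 : k - 1 < 10^(k-1) := Nat.lt_pow_self (by norm_num)
  have hk : k ≤ 10^(k-1) := by omega
  calc (k:Int) ≤ ((10^(k-1) : Nat) : Int) := by exact_mod_cast hk
    _ = 10^(k-1) := by push_cast; ring

theorem numToVec_eq (k : Nat) (n : Int) (h1 : 1 ≤ k) (hlb : (10:Int)^(k-1) ≤ n) (hub : n < 10^k) :
    numToVec n = digitsOf n k := by
  have hn : (k:Int) ≤ n := le_trans (k_le_pow k h1) hlb
  have hfuel : k ≤ n.natAbs + 1 := by omega
  unfold numToVec
  rw [numToVecLoop_spec k (n.natAbs+1) n [] h1 hfuel hlb hub]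
  have hk0 : ¬ k = 0 := by omega
  simp [length_lsbOf, PySem.List.slice?_none_none_neg_one, digitsOf, hk0]

theorem numToVec_zero : numToVec 0 = [0] := by decide

theorem digitsOf_zero_one : digitsOf 0 1 = [0] := by decide

theorem altLen_eq (k : Nat) (n : Int) (h1 : 1 ≤ k) (hlb : (10:Int)^(k-1) ≤ n) (hub : n < 10^k) :
    altLenLoop (n.natAbs + 1) n 1 = (k : Int) := by
  have hn : (k:Int) ≤ n := le_trans (k_le_pow k h1) hlb
  rw [altLenLoop_spec k (n.natAbs+1) n 1 h1 (by omega) hlb hub]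
  omega

theorem altLen_zero (f : Nat) : altLenLoop f 0 1 = 1 := altLenLoop_lt10 f 0 1 (by norm_num)

theorem exists_k (n : Int) (h0 : 1 ≤ n) (hub : n ≤ 2147483648) :
    ∃ k : Nat, 1 ≤ k ∧ k ≤ 10 ∧ (10:Int)^(k-1) ≤ n ∧ n < 10^k := by
  by_cases c1 : n < 10
  · exact ⟨1, by norm_num, by norm_num, by simpa using h0, by simpa using c1⟩
  by_cases c2 : n < 100
  · exact ⟨2, by norm_num, by norm_num, by norm_num; omega, by norm_num; omega⟩
  by_cases c3 : n < 1000
  · exact ⟨3, by norm_num, by norm_num, by norm_num; omega, by norm_num; omega⟩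
  by_cases c4 : n < 10000
  · exact ⟨4, by norm_num, by norm_num, by norm_num; omega, by norm_num; omega⟩
  by_cases c5 : n < 100000
  · exact ⟨5, by norm_num, by norm_num, by norm_num; omega, by norm_num; omega⟩
  by_cases c6 : n < 1000000
  · exact ⟨6, by norm_num, by norm_num, by norm_num; omega, by norm_num; omega⟩
  by_cases c7 : n < 10000000
  · exact ⟨7, by norm_num, by norm_num, by norm_num; omega, by norm_num; omega⟩
  by_cases c8 : n < 100000000
  · exact ⟨8, by norm_num, by norm_num, by norm_num; omega, by norm_num; omega⟩
  by_cases c9 : n < 1000000000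
  · exact ⟨9, by norm_num, by norm_num, by norm_num; omega, by norm_num; omega⟩
  · exact ⟨10, by norm_num, by norm_num, by norm_num; omega, by norm_num; omega⟩

def stepF (S : List Int) (d : Int) (s : Int × Bool) (c : Int) : Int × Bool :=
  (s.1 * d + (if s.2 then ((S.filter (fun a => a < c)).length : Int) else 0), s.2 && S.contains c)

theorem altCount_eq_foldl (S : List Int) (d : Int) (n : Int) (k : Nat) :
    altCount S d n k = (digitsOf n k).foldl (stepF S d) (0, true) := by
  induction k generalizing n with
  | zero => simp [altCount, digitsOf, lsbOf]
  | succ k ih =>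
    have hd : digitsOf n (k+1) = digitsOf (PySem.Int.floordiv n 10) k ++ [PySem.Int.mod n 10] := by
      simp [digitsOf, lsbOf]
    rw [hd, List.foldl_append]
    simp only [altCount, ← ih]
    rfl

theorem foldl_stepF_sub (S : List Int) (d : Int) :
    ∀ (l : List Int) (v e : Int) (ok : Bool),
      (l.foldl (stepF S d) (v - e, ok)).1 = (l.foldl (stepF S d) (v, ok)).1 - e * d ^ l.length := by
  intro l
  induction l with
  | nil => intro v e ok; simp
  | cons c l ih =>
    intro v e ok
    have h1 : stepF S d (v - e, ok) c
        = ((v * d + (if ok then ((S.filter (fun a => a < c)).length : Int) else 0)) - e * d,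
           ok && S.contains c) := by
      simp [stepF]; ring
    have h2 : stepF S d (v, ok) c
        = ((v * d + (if ok then ((S.filter (fun a => a < c)).length : Int) else 0)),
           ok && S.contains c) := rfl
    simp only [List.foldl_cons, h1, h2, ih]
    rw [List.length_cons]
    ring

theorem rank_eq (A : List Int) (hA0 : ∀ a ∈ A, 0 ≤ a) (c : Nat) :
    (((PySem.Set.ofList A).filter (fun a => a < (c:Int))).length : Int)
      = ((List.range c).countP (fun t : Nat => decide ((t:Int) ∈ A)) : Int) := by
  have hnd : ((PySem.Set.ofList A).filter (fun a => a < (c:Int))).Nodup :=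
    (PySem.Set.nodup_ofList A).filter _
  have hnd2 : ((List.range c).filter (fun t : Nat => decide ((t:Int) ∈ A))).Nodup :=
    (List.nodup_range).filter _
  rw [List.countP_eq_length_filter]
  have h1 : ((PySem.Set.ofList A).filter (fun a => a < (c:Int))).length
      = ((PySem.Set.ofList A).filter (fun a => a < (c:Int))).toFinset.card :=
    (List.toFinset_card_of_nodup hnd).symm
  have h2 : ((List.range c).filter (fun t : Nat => decide ((t:Int) ∈ A))).length
      = ((List.range c).filter (fun t : Nat => decide ((t:Int) ∈ A))).toFinset.card :=
    (List.toFinset_card_of_nodup hnd2).symm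
  rw [h1, h2]
  norm_cast
  apply Finset.card_bij' (fun (a : Int) _ => a.toNat) (fun (t : Nat) _ => (t:Int))
  · intro a ha
    simp only [List.mem_toFinset, List.mem_filter, PySem.Set.mem_ofList, decide_eq_true_eq] at ha ⊢
    have := hA0 a ha.1
    constructor
    · simp [List.mem_range]; omega
    · simpa [Int.toNat_of_nonneg this] using ha.1
  · intro t ht
    simp only [List.mem_toFinset, List.mem_filter, List.mem_range, PySem.Set.mem_ofList,
      decide_eq_true_eq] at ht ⊢
    exact ⟨ht.2, by exact_mod_cast ht.1⟩
  · intro a ha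
    simp only [List.mem_toFinset, List.mem_filter, PySem.Set.mem_ofList] at ha
    exact Int.toNat_of_nonneg (hA0 a ha.1)
  · intro t _
    exact Int.toNat_natCast t

def adjRun (S : List Int) (d : Int) (q : Bool) : List Int → Int × Bool
  | [] => (0, true)
  | c :: rest => rest.foldl (stepF S d)
      ((((S.filter (fun a => a < c)).length : Int)) - (if q then 1 else 0), S.contains c)


theorem adjRun_concat (S : List Int) (dd : Int) (q : Bool) (pre : List Int) (hpre : pre ≠ []) (c : Int) :
    adjRun S dd q (pre ++ [c]) = stepF S dd (adjRun S dd q pre) c := by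
  cases pre with
  | nil => exact absurd rfl hpre
  | cons c0 rest => simp [adjRun, List.cons_append, List.foldl_append]


-- indicator-table lemma for: for i in range(d): lower[A[i]+1] = 1
theorem foldl_mark_length : ∀ (A : List Int) (l : List Int),
    (A.foldl (fun l a => PySem.List.pySetD l (a + 1) 1) l).length = l.length := by
  intro A
  induction A with
  | nil => intro l; rfl
  | cons a A ih => intro l; rw [List.foldl_cons, ih, PySem.List.length_pySetD]

theorem foldl_mark_getD (A : List Int) (hA : ∀ a ∈ A, 0 ≤ a ∧ a ≤ 9) :
    ∀ (l : List Int), l.length = 11 → ∀ j : Nat, j ≤ 10 →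
      PySem.List.pyGetD (A.foldl (fun l a => PySem.List.pySetD l (a + 1) 1) l) (j:Int) (0:Int)
        = if ((j:Int) - 1) ∈ A then 1 else PySem.List.pyGetD l (j:Int) 0 := by
  induction A with
  | nil => intro l _ j _; simp
  | cons a A ih =>
    intro l hl j hj
    have ha := hA a (by simp)
    have hA' : ∀ a ∈ A, 0 ≤ a ∧ a ≤ 9 := fun x hx => hA x (by simp [hx])
    rw [List.foldl_cons]
    have hcast : a + 1 = ((a.toNat + 1 : Nat) : Int) := by omega
    rw [hcast,
      ih hA' _ (by rw [PySem.List.length_pySetD]; exact hl) j hj]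
    rw [PySem.List.pyGetD_pySetD_natCast l (a.toNat + 1) j 1 0 (by omega)]
    by_cases hmem : ((j:Int) - 1) ∈ A
    · rw [if_pos hmem, if_pos (by simp [hmem])]
    · have hja : (j = a.toNat + 1) ↔ ((j:Int) - 1 = a) := by omega
      by_cases hj2 : (j:Int) - 1 = a
      · rw [if_neg hmem, if_pos (hja.mpr hj2), if_pos (by simp [hj2])]
      · rw [if_neg hmem, if_neg (fun h => hj2 (hja.mp h)), if_neg (by simp [hmem, hj2])]

-- prefix-sum lemma for: for i in range(1, 11): lower[i] = lower[i-1] + lower[i]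
theorem prefix_fold_spec (l : List Int) (hl : l.length = 11) :
    ∀ (m : Nat), m ≤ 10 →
    ((PySem.List.pyRange 1 ((m:Int)+1)).foldl
        (fun l i => PySem.List.pySetD l i (PySem.List.pyGetD l (i-1) 0 + PySem.List.pyGetD l i 0)) l).length = 11 ∧
    (∀ j : Nat, j ≤ m →
      PySem.List.pyGetD ((PySem.List.pyRange 1 ((m:Int)+1)).foldl
        (fun l i => PySem.List.pySetD l i (PySem.List.pyGetD l (i-1) 0 + PySem.List.pyGetD l i 0)) l) (j:Int) 0
        = ((List.range (j+1)).map (fun t : Nat => PySem.List.pyGetD l (t:Int) 0)).sum) ∧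
    (∀ j : Nat, m < j → j ≤ 10 →
      PySem.List.pyGetD ((PySem.List.pyRange 1 ((m:Int)+1)).foldl
        (fun l i => PySem.List.pySetD l i (PySem.List.pyGetD l (i-1) 0 + PySem.List.pyGetD l i 0)) l) (j:Int) 0
        = PySem.List.pyGetD l (j:Int) 0) := by
  intro m
  induction m with
  | zero =>
    intro _
    rw [show ((0:Nat):Int) + 1 = 1 by norm_num, PySem.List.pyRange_one_eq_nil (by norm_num)]
    refine ⟨by simpa using hl, ?_, fun j _ _ => rfl⟩
    intro j hj
    interval_cases j
    simp [PySem.List.pyGetD_zero, List.getD]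
  | succ m ih =>
    intro hm
    obtain ⟨ihlen, ihin, ihout⟩ := ih (by omega)
    have hrange : PySem.List.pyRange 1 (((m+1:Nat):Int)+1)
        = PySem.List.pyRange 1 ((m:Int)+1) ++ [(m:Int)+1] := by
      have hc : (((m+1:Nat)):Int)+1 = ((m:Int)+1)+1 := by push_cast; ring
      rw [hc, PySem.List.pyRange_one_succ_right (by omega)]
    have hfold : (PySem.List.pyRange 1 (((m+1:Nat):Int)+1)).foldl
          (fun l i => PySem.List.pySetD l i (PySem.List.pyGetD l (i-1) 0 + PySem.List.pyGetD l i 0)) l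
        = PySem.List.pySetD
            ((PySem.List.pyRange 1 ((m:Int)+1)).foldl
              (fun l i => PySem.List.pySetD l i (PySem.List.pyGetD l (i-1) 0 + PySem.List.pyGetD l i 0)) l)
            (((m+1:Nat)):Int)
            (PySem.List.pyGetD
              ((PySem.List.pyRange 1 ((m:Int)+1)).foldl
                (fun l i => PySem.List.pySetD l i (PySem.List.pyGetD l (i-1) 0 + PySem.List.pyGetD l i 0)) l) ((m:Int)) 0
             + PySem.List.pyGetD
              ((PySem.List.pyRange 1 ((m:Int)+1)).foldl
                (fun l i => PySem.List.pySetD l i (PySem.List.pyGetD l (i-1) 0 + PySem.List.pyGetD l i 0)) l) ((m:Int)+1) 0) := by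
      rw [hrange, List.foldl_append]
      simp only [List.foldl_cons, List.foldl_nil]
      rw [show ((m:Int)+1) - 1 = (m:Int) by ring]
      push_cast
      rfl
    rw [hfold]
    refine ⟨by rw [PySem.List.length_pySetD]; exact ihlen, ?_, ?_⟩
    · intro j hj
      rw [PySem.List.pyGetD_pySetD_natCast _ (m+1) j _ 0 (by rw [ihlen]; omega)]
      by_cases hje : j = m + 1
      · subst hje
        rw [if_pos rfl]
        have h1 := ihin m le_rfl
        have h2 := ihout (m+1) (by omega) (by omega)
        push_cast at h2
        rw [h1, h2]
        have h3 : PySem.List.pyGetD l ((m:Int)+1) 0 = l.getD (m+1) 0 := by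
          rw [show ((m:Int)+1) = (((m+1:Nat)):Int) by push_cast; ring, PySem.List.pyGetD_natCast]
        rw [h3]
        have expand : ∀ n : Nat, (List.map (fun t : Nat => PySem.List.pyGetD l (t:Int) 0) (List.range (n+1))).sum
            = (List.map (fun t : Nat => PySem.List.pyGetD l (t:Int) 0) (List.range n)).sum
              + PySem.List.pyGetD l (n:Int) 0 := by
          intro n; rw [List.range_succ, List.map_append, List.sum_append]; simp
        rw [show m+1+1 = (m+1)+1 from rfl, expand (m+1), expand m]
        simp [List.getD, h3]
      · rw [if_neg hje, ihin j (by omega)]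
    · intro j hj1 hj2
      rw [PySem.List.pyGetD_pySetD_natCast _ (m+1) j _ 0 (by rw [ihlen]; omega)]
      rw [if_neg (by omega), ihout j (by omega) hj2]

theorem getset1 (xs : List Int) (v : Int) (h : 1 < xs.length) :
    PySem.List.pyGetD (PySem.List.pySetD xs 1 v) 1 0 = v := by
  rw [PySem.List.pySetD_of_nonneg _ _ (by norm_num), PySem.List.pyGetD_ofNat']
  norm_num
  simp [h]

theorem getset_cast (xs : List Int) (v : Int) (j : Nat) (h : j + 1 < xs.length) :
    PySem.List.pyGetD (PySem.List.pySetD xs ((j:Int)+1) v) ((j:Int)+1) 0 = v := by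
  rw [show ((j:Int)+1) = (((j+1:Nat)):Int) by push_cast; ring]
  rw [PySem.List.pyGetD_pySetD_natCast _ _ _ _ _ h]
  simp

theorem aloop_inv (S lower ds dp0 : List Int) (dd : Int) (Q : Prop) [Decidable Q] (k : Nat)
    (hds : ds.length = k)
    (hrank : ∀ c ∈ ds, PySem.List.pyGetD lower c 0 = ((S.filter (fun a => a < c)).length : Int))
    (hmem : ∀ c ∈ ds, (PySem.List.pyGetD lower (c+1) 0 == PySem.List.pyGetD lower c 0 + 1) = S.contains c)
    (hlen : dp0.length = k+1) (h0 : PySem.List.pyGetD dp0 0 0 = 0) :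
    ∀ j : Nat, 1 ≤ j → j ≤ k →
      ((PySem.List.pyRange 1 ((j:Int)+1)).foldl
        (fun (s : List Int × Bool) i =>
          let dp := s.1
          let flag := s.2
          let d2 := PySem.List.pyGetD lower (PySem.List.pyGetD ds (i - 1) 0) 0
          let dp := PySem.List.pySetD dp i (PySem.List.pyGetD dp (i - 1) 0 * dd)
          let d2 := if i = 1 ∧ Q then d2 - 1 else d2
          let dp := if flag then PySem.List.pySetD dp i (PySem.List.pyGetD dp i 0 + d2) else dp
          let flag := flag && (PySem.List.pyGetD lower (PySem.List.pyGetD ds (i - 1) 0 + 1) 0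
                                == PySem.List.pyGetD lower (PySem.List.pyGetD ds (i - 1) 0) 0 + 1)
          (dp, flag)) (dp0, true)).1.length = k+1 ∧
      ((PySem.List.pyRange 1 ((j:Int)+1)).foldl
        (fun (s : List Int × Bool) i =>
          let dp := s.1
          let flag := s.2
          let d2 := PySem.List.pyGetD lower (PySem.List.pyGetD ds (i - 1) 0) 0
          let dp := PySem.List.pySetD dp i (PySem.List.pyGetD dp (i - 1) 0 * dd)
          let d2 := if i = 1 ∧ Q then d2 - 1 else d2
          let dp := if flag then PySem.List.pySetD dp i (PySem.List.pyGetD dp i 0 + d2) else dp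
          let flag := flag && (PySem.List.pyGetD lower (PySem.List.pyGetD ds (i - 1) 0 + 1) 0
                                == PySem.List.pyGetD lower (PySem.List.pyGetD ds (i - 1) 0) 0 + 1)
          (dp, flag)) (dp0, true)).2 = (adjRun S dd (decide Q) (ds.take j)).2 ∧
      PySem.List.pyGetD ((PySem.List.pyRange 1 ((j:Int)+1)).foldl
        (fun (s : List Int × Bool) i =>
          let dp := s.1
          let flag := s.2
          let d2 := PySem.List.pyGetD lower (PySem.List.pyGetD ds (i - 1) 0) 0
          let dp := PySem.List.pySetD dp i (PySem.List.pyGetD dp (i - 1) 0 * dd)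
          let d2 := if i = 1 ∧ Q then d2 - 1 else d2
          let dp := if flag then PySem.List.pySetD dp i (PySem.List.pyGetD dp i 0 + d2) else dp
          let flag := flag && (PySem.List.pyGetD lower (PySem.List.pyGetD ds (i - 1) 0 + 1) 0
                                == PySem.List.pyGetD lower (PySem.List.pyGetD ds (i - 1) 0) 0 + 1)
          (dp, flag)) (dp0, true)).1 (j:Int) 0 = (adjRun S dd (decide Q) (ds.take j)).1 := by
  intro j hj1
  induction j, hj1 using Nat.le_induction with
  | base =>
    intro hk
    obtain ⟨c0, rest, rfl⟩ : ∃ c0 rest, ds = c0 :: rest := by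
      cases ds with
      | nil => simp at hds; omega
      | cons a t => exact ⟨a, t, rfl⟩
    have hc0 : c0 ∈ c0 :: rest := by simp
    have hr1 : PySem.List.pyRange 1 (((1:Nat):Int)+1) = [1] := by
      rw [Nat.cast_one]; exact PySem.List.pyRange_one_singleton 1
    rw [hr1]
    simp only [List.foldl_cons, List.foldl_nil]
    simp only [show (1:Int)-1 = 0 from rfl, PySem.List.pyGetD_zero_cons, h0,
      eq_self_iff_true, true_and, if_true, Bool.true_and, zero_mul]
    have htake : List.take 1 (c0 :: rest) = [c0] := by simp
    have hadj : adjRun S dd (decide Q) [c0]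
        = (((S.filter (fun a => a < c0)).length : Int) - (if (decide Q) then 1 else 0), S.contains c0) := by
      simp [adjRun]
    have hl1 : 1 < dp0.length := by omega
    have hin : PySem.List.pyGetD (PySem.List.pySetD dp0 1 0) 1 0 = 0 := getset1 dp0 0 hl1
    refine ⟨by simp [PySem.List.length_pySetD, hlen], ?_, ?_⟩
    · rw [htake, hadj]
      exact hmem c0 hc0
    · rw [htake, hadj, show ((1:Nat):Int) = (1:Int) by simp, hin,
        getset1 _ _ (by simp [PySem.List.length_pySetD]; omega), hrank c0 hc0]
      by_cases hq : Q <;> simp [hq]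
  | succ n hn ih =>
    intro hnk
    obtain ⟨ihlen, ihflag, ihval⟩ := ih (by omega)
    have hrange : PySem.List.pyRange 1 ((((n+1:Nat)):Int)+1)
        = PySem.List.pyRange 1 ((n:Int)+1) ++ [(n:Int)+1] := by
      have hc : (((n+1:Nat)):Int)+1 = ((n:Int)+1)+1 := by push_cast; ring
      rw [hc, PySem.List.pyRange_one_succ_right (by omega)]
    have hidx : ((n:Int)+1)-1 = (n:Int) := by ring
    have hnlt : n < ds.length := by omega
    have hcget : PySem.List.pyGetD ds ((n:Int)) 0 = ds[n] := PySem.List.pyGetD_ofNat ds n 0 hnlt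
    have hcmem : ds[n] ∈ ds := List.getElem_mem hnlt
    have htake : ds.take (n+1) = ds.take n ++ [ds[n]] := by
      rw [List.take_succ, List.getElem?_eq_getElem hnlt]
      rfl
    have hne : ds.take n ≠ [] := by
      have : (ds.take n).length = n := by simp; omega
      intro h; rw [h] at this; simp at this; omega
    rw [hrange]
    simp only [List.foldl_append, List.foldl_cons, List.foldl_nil]
    simp only [hidx, hcget, ihval]
    have hq1 : ¬(((n:Int)+1) = 1 ∧ Q) := by
      intro h
      have := h.1
      omega
    simp only [if_neg hq1]
    rw [htake, adjRun_concat S dd (decide Q) (ds.take n) hne ds[n]]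
    simp only [hidx, hcget] at ihlen ihflag
    rw [ihflag]
    have hgs : ∀ v : Int, PySem.List.pyGetD (PySem.List.pySetD
        (List.foldl
          (fun (s : List Int × Bool) i =>
            (if s.2 = true then
                PySem.List.pySetD (PySem.List.pySetD s.1 i (PySem.List.pyGetD s.1 (i - 1) 0 * dd)) i
                  (PySem.List.pyGetD (PySem.List.pySetD s.1 i (PySem.List.pyGetD s.1 (i - 1) 0 * dd)) i 0 +
                    if i = 1 ∧ Q then PySem.List.pyGetD lower (PySem.List.pyGetD ds (i - 1) 0) 0 - 1
                    else PySem.List.pyGetD lower (PySem.List.pyGetD ds (i - 1) 0) 0)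
              else PySem.List.pySetD s.1 i (PySem.List.pyGetD s.1 (i - 1) 0 * dd),
              s.2 &&
                (PySem.List.pyGetD lower (PySem.List.pyGetD ds (i - 1) 0 + 1) 0 ==
                  PySem.List.pyGetD lower (PySem.List.pyGetD ds (i - 1) 0) 0 + 1)))
          (dp0, true) (PySem.List.pyRange 1 ((n:Int) + 1))).1 ((n:Int)+1) v) ((n:Int)+1) 0 = v := by
      intro v
      exact getset_cast _ v n (by rw [ihlen]; omega)
    rw [hgs]
    cases hA2 : (adjRun S dd (decide Q) (List.take n ds)).2 with
    | false =>
      simp only [hA2, Bool.false_eq_true, if_false]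
      refine ⟨by simp [PySem.List.length_pySetD, ihlen], by simp [stepF, hA2], ?_⟩
      push_cast
      rw [hgs]
      simp [stepF, hA2]
    | true =>
      simp only [hA2, if_true]
      refine ⟨by simp [PySem.List.length_pySetD, ihlen], ?_, ?_⟩
      · simp [stepF, hA2, hmem ds[n] hcmem]
      · push_cast
        rw [getset_cast _ _ n (by rw [PySem.List.length_pySetD, ihlen]; omega),
          hrank ds[n] hcmem]
        simp [stepF, hA2]

theorem adjRun_vs_foldl (S : List Int) (dd : Int) (q : Bool) (c0 : Int) (rest : List Int) :
    (adjRun S dd q (c0 :: rest)).1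
      = (((c0 :: rest).foldl (stepF S dd) (0, true)).1) - (if q then 1 else 0) * dd ^ rest.length := by
  have hstep : stepF S dd (0, true) c0
      = (((S.filter (fun a => a < c0)).length : Int), S.contains c0) := by
    simp [stepF]
  cases q with
  | false =>
    simp only [adjRun, List.foldl_cons, hstep, if_neg (by simp : ¬ (false = true))]
    ring_nf
  | true =>
    simp only [adjRun, List.foldl_cons, hstep]
    norm_num
    rw [foldl_stepF_sub S dd rest]
    ring

-- ===== VERDICT (by name: the statement is the Claim_ definition above) =====
theorem solve_spec : Claim_equal_solve := by
  intro A B C hdom hpre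
  obtain ⟨hC0, hBs, hA9cond⟩ := hpre
  have hC31 : C ≤ 2147483648 := by
    unfold Dom_solve at hdom
    simp only [Bool.and_eq_true, pvDomInt, decide_eq_true_eq] at hdom
    exact hdom.2.2
  obtain ⟨k, hk1, hk10, hdig, hL, hA9c⟩ :
      ∃ k : Nat, 1 ≤ k ∧ k ≤ 10 ∧ numToVec C = digitsOf C k ∧
        altLenLoop (C.natAbs+1) C 1 = (k:Int) ∧
        (B = (k:Int) → ∀ a ∈ A, 0 ≤ a ∧ a ≤ 9) := by
    by_cases hCz : C = 0
    · subst hCz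
      refine ⟨1, le_rfl, by norm_num, numToVec_zero.trans digitsOf_zero_one.symm, altLen_zero _, ?_⟩
      intro hB1
      exact hA9cond (Or.inl ⟨rfl, by simpa using hB1⟩)
    · obtain ⟨k, h1, h10, hlb, hub⟩ := exists_k C (by omega) hC31
      refine ⟨k, h1, h10, numToVec_eq k C h1 hlb hub, altLen_eq k C h1 hlb hub, ?_⟩
      intro hBk
      apply hA9cond
      right
      refine ⟨by omega, by omega, ?_, ?_⟩
      · rw [show (B-1).toNat = k - 1 from by omega]
        exact hlb
      · rw [show B.toNat = k from by omega]
        exact hub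
  show solve A B C = solve_alt A B C
  simp only [solve, solve_alt, hdig, hL, length_digitsOf]
  by_cases hc1 : B > (k:Int) ∨ ((A.length : Int)) = 0
  · rw [if_pos hc1, if_pos hc1]
  · rw [if_neg hc1, if_neg hc1]
    by_cases hc2 : B < (k:Int)
    · rw [if_pos hc2, if_pos hc2]
    · rw [if_neg hc2, if_neg hc2]
      -- Case 3: B equals the digit count of C
      have hBk : B = (k:Int) := by omega
      subst hBk
      have hA9 := hA9c rfl
      have hA0 : ∀ a ∈ A, 0 ≤ a := fun a ha => (hA9 a ha).1
      -- the lower[] table: first loop = fold over A itself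
      have hbridge :
          ((PySem.List.pyRange 0 ((A.length:Int)) 1).foldl
              (fun l i => PySem.List.pySetD l (PySem.List.pyGetD A i 0 + 1) 1)
              ((PySem.List.pyRange 0 11 1).map (fun _ => (0:Int))))
            = A.foldl (fun l a => PySem.List.pySetD l (a+1) 1)
              ((PySem.List.pyRange 0 11 1).map (fun _ => (0:Int))) := by
        have h := PySem.List.foldl_pyRange_pyGetD A (0:Int)
          (fun l a => PySem.List.pySetD l (a+1) 1)
          ((PySem.List.pyRange 0 11 1).map (fun _ => (0:Int))) (le_refl 0)
        simpa [PySem.List.len_eq] using h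
      have hl0len : (((PySem.List.pyRange 0 11 1).map (fun _ => (0:Int)))).length = 11 := by
        simp [PySem.List.length_pyRange_one]
      have hl0get : ∀ j : Nat, j ≤ 10 →
          PySem.List.pyGetD ((PySem.List.pyRange 0 11 1).map (fun _ => (0:Int))) (j:Int) 0 = 0 := by
        intro j hj
        exact PySem.List.pyGetD_map_pyRange (fun _ => (0:Int)) 11 j 0 (by omega)
      have hm1len : (A.foldl (fun l a => PySem.List.pySetD l (a+1) 1)
          ((PySem.List.pyRange 0 11 1).map (fun _ => (0:Int)))).length = 11 := by
        rw [foldl_mark_length]; exact hl0len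
      have hm1get : ∀ j : Nat, j ≤ 10 →
          PySem.List.pyGetD (A.foldl (fun l a => PySem.List.pySetD l (a+1) 1)
            ((PySem.List.pyRange 0 11 1).map (fun _ => (0:Int)))) (j:Int) 0
          = if ((j:Int) - 1) ∈ A then 1 else 0 := by
        intro j hj
        rw [foldl_mark_getD A hA9 _ hl0len j hj, hl0get j hj]
      simp only [hbridge]
      obtain ⟨hLFlen, hLFin, hLFout⟩ := prefix_fold_spec _ hm1len 10 le_rfl
      rw [show ((10:Nat):Int) + 1 = 11 from by norm_num] at hLFin hLFout
      -- the table lookup is the count of distinct A-digits below the index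
      have hRval : ∀ j : Nat, j ≤ 10 →
          PySem.List.pyGetD ((PySem.List.pyRange 1 11 1).foldl
            (fun l i => PySem.List.pySetD l i
              (PySem.List.pyGetD l (i-1) 0 + PySem.List.pyGetD l i 0))
            (A.foldl (fun l a => PySem.List.pySetD l (a+1) 1)
              ((PySem.List.pyRange 0 11 1).map (fun _ => (0:Int))))) (j:Int) 0
          = ((List.range j).countP (fun t : Nat => decide ((t:Int) ∈ A)) : Int) := by
        intro j hj
        rw [hLFin j hj]
        have hcongr : (List.range (j+1)).map (fun t : Nat =>
              PySem.List.pyGetD (A.foldl (fun l a => PySem.List.pySetD l (a+1) 1)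
                ((PySem.List.pyRange 0 11 1).map (fun _ => (0:Int)))) (t:Int) 0)
            = (List.range (j+1)).map (fun t : Nat => if ((t:Int) - 1) ∈ A then (1:Int) else 0) := by
          apply List.map_congr_left
          intro t ht
          simp only [List.mem_range] at ht
          exact hm1get t (by omega)
        rw [hcongr, List.range_succ_eq_map, List.map_cons, List.sum_cons, List.map_map]
        have hm1 : (-1 : Int) ∉ A := by
          intro h
          have := hA0 _ h
          norm_num at this
        have hshift : ((fun t : Nat => if ((t:Int) - 1) ∈ A then (1:Int) else 0) ∘ Nat.succ)
            = fun t : Nat => if (decide ((t:Int) ∈ A)) = true then (1:Int) else 0 := by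
          funext t
          have : ((Nat.succ t : Nat) : Int) - 1 = (t:Int) := by push_cast; ring
          simp only [Function.comp, this]
          by_cases h : (t:Int) ∈ A <;> simp [h]
        rw [hshift, PySem.List.sum_map_ite_one_zero]
        simp [hm1]
      -- the two table facts needed by the loop invariant
      have hrankF : ∀ c ∈ digitsOf C k,
          PySem.List.pyGetD ((PySem.List.pyRange 1 11 1).foldl
            (fun l i => PySem.List.pySetD l i
              (PySem.List.pyGetD l (i-1) 0 + PySem.List.pyGetD l i 0))
            (A.foldl (fun l a => PySem.List.pySetD l (a+1) 1)
              ((PySem.List.pyRange 0 11 1).map (fun _ => (0:Int))))) c 0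
          = (((PySem.Set.ofList A).filter (fun a => a < c)).length : Int) := by
        intro c hc
        obtain ⟨hc0, hc10⟩ := mem_digitsOf hc
        rw [show c = ((c.toNat : Nat) : Int) from by omega]
        rw [hRval c.toNat (by omega), rank_eq A hA0 c.toNat]
      have hmemF : ∀ c ∈ digitsOf C k,
          (PySem.List.pyGetD ((PySem.List.pyRange 1 11 1).foldl
            (fun l i => PySem.List.pySetD l i
              (PySem.List.pyGetD l (i-1) 0 + PySem.List.pyGetD l i 0))
            (A.foldl (fun l a => PySem.List.pySetD l (a+1) 1)
              ((PySem.List.pyRange 0 11 1).map (fun _ => (0:Int))))) (c+1) 0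
            == PySem.List.pyGetD ((PySem.List.pyRange 1 11 1).foldl
            (fun l i => PySem.List.pySetD l i
              (PySem.List.pyGetD l (i-1) 0 + PySem.List.pyGetD l i 0))
            (A.foldl (fun l a => PySem.List.pySetD l (a+1) 1)
              ((PySem.List.pyRange 0 11 1).map (fun _ => (0:Int))))) c 0 + 1)
          = List.contains (PySem.Set.ofList A) c := by
        intro c hc
        obtain ⟨hc0, hc10⟩ := mem_digitsOf hc
        rw [show c = ((c.toNat : Nat) : Int) from by omega,
          show ((c.toNat : Nat) : Int) + 1 = ((c.toNat + 1 : Nat) : Int) from by push_cast; ring,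
          hRval (c.toNat+1) (by omega), hRval c.toNat (by omega)]
        rw [List.range_succ, List.countP_append]
        by_cases h : ((c.toNat : Nat) : Int) ∈ A
        · have hcont : List.contains (PySem.Set.ofList A) ((c.toNat : Nat) : Int) = true := by
            rw [List.contains_eq_mem, decide_eq_true_eq]
            exact (PySem.Set.mem_ofList A _).mpr h
          rw [hcont]
          simp only [List.countP_cons, List.countP_nil, decide_eq_true_eq]
          rw [if_pos h]
          simp [beq_iff_eq]
        · have hcont : List.contains (PySem.Set.ofList A) ((c.toNat : Nat) : Int) = false := by
            rw [List.contains_eq_mem, decide_eq_false_iff_not]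
            exact fun h' => h ((PySem.Set.mem_ofList A _).mp h')
          rw [hcont]
          simp only [List.countP_cons, List.countP_nil, decide_eq_true_eq]
          rw [if_neg h]
          simp [beq_iff_eq]
      -- the dp array initial state
      have hdplen : (PySem.List.pySetD
          ((PySem.List.pyRange 0 (((k:Nat):Int)+1) 1).map (fun _ => (0:Int))) 0 0).length = k+1 := by
        rw [PySem.List.length_pySetD]
        simp [PySem.List.length_pyRange_one]
      have hdp0 : PySem.List.pyGetD (PySem.List.pySetD
          ((PySem.List.pyRange 0 (((k:Nat):Int)+1) 1).map (fun _ => (0:Int))) 0 0) 0 0 = 0 := by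
        rw [PySem.List.pySetD_of_nonneg _ _ (by norm_num), PySem.List.pyGetD_zero]
        have hlen : 0 < (((PySem.List.pyRange 0 (((k:Nat):Int)+1) 1).map (fun _ => (0:Int)))).length := by
          simp [PySem.List.length_pyRange_one]
        simp [List.getD, hlen]
      have inv := aloop_inv (PySem.Set.ofList A)
        ((PySem.List.pyRange 1 11 1).foldl
          (fun l i => PySem.List.pySetD l i
            (PySem.List.pyGetD l (i-1) 0 + PySem.List.pyGetD l i 0))
          (A.foldl (fun l a => PySem.List.pySetD l (a+1) 1)
            ((PySem.List.pyRange 0 11 1).map (fun _ => (0:Int)))))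
        (digitsOf C k)
        (PySem.List.pySetD ((PySem.List.pyRange 0 (((k:Nat):Int)+1) 1).map (fun _ => (0:Int))) 0 0)
        ((A.length : Int)) (PySem.List.pyGetD A 0 0 = 0 ∧ ((k:Nat):Int) ≠ 1) k
        (length_digitsOf C k) hrankF hmemF hdplen hdp0 k hk1 le_rfl
      obtain ⟨-, -, hval⟩ := inv
      rw [List.take_of_length_le (le_of_eq (length_digitsOf C k))] at hval
      obtain ⟨c0, rest, hds⟩ : ∃ c0 rest, digitsOf C k = c0 :: rest := by
        have := length_digitsOf C k
        cases hd : digitsOf C k with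
        | nil => rw [hd] at this; simp at this; omega
        | cons a t => exact ⟨a, t, rfl⟩
      have hrestlen : ((k:Int) - 1).toNat = rest.length := by
        have := length_digitsOf C k
        rw [hds] at this
        simp at this
        omega
      rw [Int.toNat_natCast, hrestlen]
      simp only [altCount_eq_foldl]
      simp only [hval]
      simp only [hds]
      rw [adjRun_vs_foldl]
      by_cases hQ : (PySem.List.pyGetD A 0 0 = 0 ∧ ((k:Nat):Int) ≠ 1)
      · rw [if_pos hQ,
          if_pos (show (decide (PySem.List.pyGetD A 0 0 = 0 ∧ ((k:Nat):Int) ≠ 1)) = true from by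
            simp only [decide_eq_true_eq]; exact hQ)]
        ring
      · rw [if_neg hQ,
          if_neg (show ¬ (decide (PySem.List.pyGetD A 0 0 = 0 ∧ ((k:Nat):Int) ≠ 1)) = true from by
            simp only [decide_eq_true_eq]; exact hQ)]
        ring
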